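-- pv_equiv track=rewrite | github.com/MrBrantCode/unitest_baseline | mut_generate/mist_test_taco/taco_2581/solution.py | compute_cellular_automaton_states
-- ===== SOURCE A (Python) =====
-- from operator import mul
--
-- def dot(v1, v2):
--     return sum(map(mul, v1, v2))
--
-- def mat_mul(A, B, m):
--     tB = tuple(zip(*B))
--     return [[dot(A_i, B_j) % m for B_j in tB] for A_i in A]
--
-- def mat_pow(X, n, m):
--     s = len(X)
--     A = [[0] * s for i in range(s)]
--     for i in range(s):
--         A[i][i] = 1
--     while n > 0:
--         if n & 1:
--             A = mat_mul(A, X, m)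
--         X = mat_mul(X, X, m)
--         n >>= 1
--     return A
--
-- def compute_cellular_automaton_states(N, M, A, B, C, T, initial_states):
--     X = [[0] * N for i in range(N)]
--     X[0][0] = B
--     X[0][1] = A
--     for (i, X_i) in enumerate(X[1:N - 1], start=1):
--         X_i[i - 1] = C
--         X_i[i] = B
--         X_i[i + 1] = A
--     X[-1][-2] = C
--     X[-1][-1] = B
--
--     s = [initial_states]
--     ans = mat_mul(s, mat_pow(X, T, M), M)
--     return ans[0]
-- ===== SOURCE B (Python) =====
-- def compute_cellular_automaton_states(N, M, A, B, C, T, initial_states):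
--     X = [[B if j == i else A if j == i + 1 else C if j == i - 1 else 0
--           for j in range(N)] for i in range(N)]
--
--     def mat_mul(P, Q):
--         return [[sum(P[i][k] * Q[k][j] for k in range(N)) % M
--                  for j in range(N)] for i in range(N)]
--
--     def power(P, n):
--         if n <= 0:
--             return [[1 if i == j else 0 for j in range(N)] for i in range(N)]
--         H = power(P, n // 2)
--         H2 = mat_mul(H, H)
--         return mat_mul(H2, P) if n % 2 else H2
--
--     P = power(X, T)
--     out = [0] * N
--     for x, row in zip(initial_states, P):
--         out = [o + x * r for o, r in zip(out, row)]
--     return [o % M for o in out]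
-- ===== Notes on version B (the rewrite author's own statement) =====
-- stated objective: alternative
-- what changed: B builds the tridiagonal matrix by a closed-form comprehension instead of mutation with boundary special-cases, replaces the iterative bit-scanning matrix power with top-down recursive halving, multiplies by explicit index sums instead of zip-transpose, and streams the initial vector row-by-row through the power instead of a 1xN matrix product.
-- crash fix: For N <= 1 A raises IndexError while writing the boundary entries of X; B returns the simulated automaton result ([] for N <= 0, the 1x1 value for N = 1 when M != 0). — e.g. on compute_cellular_automaton_states(1, 5, 1, 2, 3, 2, [1]): A raises IndexError, B returns [4]
import Mathlib
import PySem

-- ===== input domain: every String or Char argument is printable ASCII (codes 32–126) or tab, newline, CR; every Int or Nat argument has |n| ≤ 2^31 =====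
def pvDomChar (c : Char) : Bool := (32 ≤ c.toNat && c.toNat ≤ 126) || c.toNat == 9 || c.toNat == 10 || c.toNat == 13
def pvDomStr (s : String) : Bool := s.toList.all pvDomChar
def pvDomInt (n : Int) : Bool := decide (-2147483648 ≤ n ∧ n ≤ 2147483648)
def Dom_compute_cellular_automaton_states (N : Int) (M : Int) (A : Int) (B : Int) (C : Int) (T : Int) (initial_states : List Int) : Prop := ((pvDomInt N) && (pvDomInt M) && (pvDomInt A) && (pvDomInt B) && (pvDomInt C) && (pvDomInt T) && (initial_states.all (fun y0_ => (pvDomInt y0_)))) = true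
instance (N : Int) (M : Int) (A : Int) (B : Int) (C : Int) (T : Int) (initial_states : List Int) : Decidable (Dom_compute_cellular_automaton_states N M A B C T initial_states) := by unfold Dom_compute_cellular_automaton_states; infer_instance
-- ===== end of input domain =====

-- B rebuilds the same automaton step differently: closed-form tridiagonal matrix, recursive halving
-- power, index-sum multiplication, row-streamed vector product (objective: alternative; same cost).

-- ===== PORT A =====
-- sum(map(mul, v1, v2)) : truncates to the shorter vector, exactly like zipWith
def pvDot (v1 v2 : List Int) : Int := (List.zipWith (· * ·) v1 v2).sum

-- tuple(zip(*B)) : columns 0..w-1 where w is the minimum row length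
def pvZipStar (rows : List (List Int)) : List (List Int) :=
  match rows with
  | [] => []
  | r :: rs =>
    (List.range (rs.foldl (fun w row => min w row.length) r.length)).map
      (fun j => (r :: rs).map (fun row => row.getD j 0))

def pvMatMulA (P Q : List (List Int)) (m : Int) : List (List Int) :=
  P.map (fun Ai => (pvZipStar Q).map (fun Bj => PySem.Int.mod (pvDot Ai Bj) m))

-- identity built as in mat_pow: zero matrix, then set the diagonal
def pvIdentA (s : Nat) : List (List Int) :=
  (List.range s).foldl (fun Acc i => Acc.set i ((Acc.getD i []).set i 1))
    (List.replicate s (List.replicate s (0 : Int)))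

-- the while-loop of mat_pow; n & 1 is PySem.Int.band, n >> 1 is floor division by 2;
-- fuel = initial n.toNat bounds the iteration count (n at least halves each turn), totality only
def pvMatPowLoop (fuel : Nat) (Acc X : List (List Int)) (n m : Int) : List (List Int) :=
  match fuel with
  | 0 => Acc
  | fuel + 1 =>
    if 0 < n then
      pvMatPowLoop fuel (if PySem.Int.band n 1 ≠ 0 then pvMatMulA Acc X m else Acc)
        (pvMatMulA X X m) (PySem.Int.floordiv n 2) m
    else Acc

def pvMatPowA (X : List (List Int)) (n m : Int) : List (List Int) :=
  pvMatPowLoop n.toNat (pvIdentA X.length) X n m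

-- indices 0, 1, i-1, i, i+1, -1, -2 are all in range on Pre_ (N ≥ 2), so List.set/getD are exact
def compute_cellular_automaton_states (N : Int) (M : Int) (A : Int) (B : Int) (C : Int) (T : Int) (initial_states : List Int) : List Int :=
  let n := N.toNat
  let X0 := List.replicate n (List.replicate n (0 : Int))
  let X1 := X0.set 0 (((X0.getD 0 []).set 0 B).set 1 A)
  let X2 := (List.range (n - 2)).foldl
    (fun X k => X.set (k + 1) ((((X.getD (k + 1) []).set k C).set (k + 1) B).set (k + 2) A)) X1
  let X3 := X2.set (n - 1) (((X2.getD (n - 1) []).set (n - 2) C).set (n - 1) B)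
  (pvMatMulA [initial_states] (pvMatPowA X3 T M) M).headI

-- ===== PORT B =====
def pvTri (A B C : Int) (n : Nat) : List (List Int) :=
  (List.range n).map (fun i => (List.range n).map (fun j =>
    if j = i then B else if j = i + 1 then A else if j = i - 1 then C else (0 : Int)))

def pvMatMulB (n : Nat) (m : Int) (P Q : List (List Int)) : List (List Int) :=
  (List.range n).map (fun i => (List.range n).map (fun j =>
    PySem.Int.mod
      (((List.range n).map (fun k => (P.getD i []).getD k 0 * (Q.getD k []).getD j 0)).sum) m))

-- recursive halving; fuel = initial t.toNat bounds the recursion depth, totality only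
def pvPowB (n : Nat) (m : Int) (P : List (List Int)) (fuel : Nat) (t : Int) : List (List Int) :=
  match fuel with
  | 0 => (List.range n).map (fun i => (List.range n).map (fun j => if i = j then (1 : Int) else 0))
  | fuel + 1 =>
    if t ≤ 0 then
      (List.range n).map (fun i => (List.range n).map (fun j => if i = j then (1 : Int) else 0))
    else
      let H := pvPowB n m P fuel (PySem.Int.floordiv t 2)
      let H2 := pvMatMulB n m H H
      if PySem.Int.mod t 2 ≠ 0 then pvMatMulB n m H2 P else H2

def compute_cellular_automaton_states_alt (N : Int) (M : Int) (A : Int) (B : Int) (C : Int) (T : Int) (initial_states : List Int) : List Int :=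
  let n := N.toNat
  let P := pvPowB n M (pvTri A B C n) T.toNat T
  (((List.zip initial_states P).foldl
      (fun out xr => List.zipWith (fun o r => o + xr.1 * r) out xr.2)
      (List.replicate n (0 : Int))).map (fun o => PySem.Int.mod o M))

-- ===== PRECONDITION & SPEC =====
-- A raises IndexError for N ≤ 1 (boundary writes X[0][1], X[-1][-2]) and ZeroDivisionError for M = 0.
def Pre_compute_cellular_automaton_states (N : Int) (M : Int) (A : Int) (B : Int) (C : Int) (T : Int) (initial_states : List Int) : Prop :=
  2 ≤ N ∧ M ≠ 0
instance (N : Int) (M : Int) (A : Int) (B : Int) (C : Int) (T : Int) (initial_states : List Int) : Decidable (Pre_compute_cellular_automaton_states N M A B C T initial_states) := by unfold Pre_compute_cellular_automaton_states; infer_instance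

def pvWitness_compute_cellular_automaton_states : Int × Int × Int × Int × Int × Int × List Int :=
  (2, 5, 1, 1, 1, 3, [1, 2])

-- For N ≤ 1 A raises IndexError writing the boundary entries of X before ever dividing; B returns
-- the simulated automaton result ([] for N ≤ 0, the 1×1 value for N = 1; N = 1 needs M ≠ 0).
def Raises_compute_cellular_automaton_states (N : Int) (M : Int) (A : Int) (B : Int) (C : Int) (T : Int) (initial_states : List Int) : Prop :=
  N ≤ 1 ∧ (M ≠ 0 ∨ N ≤ 0)
instance (N : Int) (M : Int) (A : Int) (B : Int) (C : Int) (T : Int) (initial_states : List Int) : Decidable (Raises_compute_cellular_automaton_states N M A B C T initial_states) := by unfold Raises_compute_cellular_automaton_states; infer_instance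
def pvRaiseWitness_compute_cellular_automaton_states : Int × Int × Int × Int × Int × Int × List Int :=
  (1, 5, 1, 2, 3, 2, [1])
def pvRaiseWitnessOut_compute_cellular_automaton_states : List Int := [4]

def Spec_compute_cellular_automaton_states (N : Int) (M : Int) (A : Int) (B : Int) (C : Int) (T : Int) (initial_states : List Int) (out : List Int) : Prop := out = compute_cellular_automaton_states_alt N M A B C T initial_states
instance (N : Int) (M : Int) (A : Int) (B : Int) (C : Int) (T : Int) (initial_states : List Int) (out : List Int) : Decidable (Spec_compute_cellular_automaton_states N M A B C T initial_states out) := by unfold Spec_compute_cellular_automaton_states; infer_instance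

-- ===== CLAIM (what is proved, stated in full; the proofs are below) =====
def Claim_equal_compute_cellular_automaton_states : Prop := ∀ (N : Int) (M : Int) (A : Int) (B : Int) (C : Int) (T : Int) (initial_states : List Int), Dom_compute_cellular_automaton_states N M A B C T initial_states → Pre_compute_cellular_automaton_states N M A B C T initial_states → Spec_compute_cellular_automaton_states N M A B C T initial_states (compute_cellular_automaton_states N M A B C T initial_states)

def Claim_raises_compute_cellular_automaton_states : Prop := (∀ (N : Int) (M : Int) (A : Int) (B : Int) (C : Int) (T : Int) (initial_states : List Int), Dom_compute_cellular_automaton_states N M A B C T initial_states → Raises_compute_cellular_automaton_states N M A B C T initial_states → ¬ Pre_compute_cellular_automaton_states N M A B C T initial_states) ∧ (Dom_compute_cellular_automaton_states (pvRaiseWitness_compute_cellular_automaton_states.1) (pvRaiseWitness_compute_cellular_automaton_states.2.1) (pvRaiseWitness_compute_cellular_automaton_states.2.2.1) (pvRaiseWitness_compute_cellular_automaton_states.2.2.2.1) (pvRaiseWitness_compute_cellular_automaton_states.2.2.2.2.1) (pvRaiseWitness_compute_cellular_automaton_states.2.2.2.2.2.1) (pvRaiseWitness_compute_cellular_automaton_states.2.2.2.2.2.2)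 ∧ Raises_compute_cellular_automaton_states (pvRaiseWitness_compute_cellular_automaton_states.1) (pvRaiseWitness_compute_cellular_automaton_states.2.1) (pvRaiseWitness_compute_cellular_automaton_states.2.2.1) (pvRaiseWitness_compute_cellular_automaton_states.2.2.2.1) (pvRaiseWitness_compute_cellular_automaton_states.2.2.2.2.1) (pvRaiseWitness_compute_cellular_automaton_states.2.2.2.2.2.1) (pvRaiseWitness_compute_cellular_automaton_states.2.2.2.2.2.2) ∧ compute_cellular_automaton_states_alt (pvRaiseWitness_compute_cellular_automaton_states.1) (pvRaiseWitness_compute_cellular_automaton_states.2.1) (pvRaiseWitness_compute_cellular_automaton_states.2.2.1) (pvRaiseWitness_compute_cellular_automaton_states.2.2.2.1) (pvRaiseWitness_compute_cellular_automaton_states.2.2.2.2.1) (pvRaiseWitness_compute_cellular_automaton_states.2.2.2.2.2.1) (pvRaiseWitness_compute_cellular_automaton_states.2.2.2.2.2.2) = pvRaiseWitnessOut_compute_cellular_automaton_states)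

-- ===== LEMMAS AND PROOFS =====

-- entry access and abstract (un-modded) matrix product over an n×n index grid
def pvE (P : List (List Int)) (i j : Nat) : Int := (P.getD i []).getD j 0

def pvShape (n : Nat) (P : List (List Int)) : Prop := P.length = n ∧ ∀ r ∈ P, r.length = n

def pvPM (n : Nat) (P Q : List (List Int)) : List (List Int) :=
  (List.range n).map (fun i => (List.range n).map (fun j =>
    ((List.range n).map (fun k => pvE P i k * pvE Q k j)).sum))

def pvMM (m : Int) (P : List (List Int)) : List (List Int) :=
  P.map (fun r => r.map (fun x => PySem.Int.mod x m))

def pvI (n : Nat) : List (List Int) :=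
  (List.range n).map (fun i => (List.range n).map (fun j => if i = j then (1 : Int) else 0))

def pvRawPow (n : Nat) (X : List (List Int)) : Nat → List (List Int)
  | 0 => pvI n
  | k + 1 => pvPM n (pvRawPow n X k) X

theorem pv_sum_range (n : Nat) (f : Nat → Int) :
    ∑ k ∈ Finset.range n, f k = ((List.range n).map f).sum := by
  induction n with
  | zero => simp
  | succ m ih => rw [Finset.sum_range_succ, List.range_succ]; simp [ih]

theorem pv_getD_set' (l : List (List Int)) (i j : Nat) (x : List Int) :
    (l.set i x).getD j [] = if j = i ∧ i < l.length then x else l.getD j [] := by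
  simp only [List.getD, List.getElem?_set]
  split_ifs with h1 h2 h3 <;> simp_all

theorem pvmod_zero (m : Int) : PySem.Int.mod 0 m = 0 :=
  (PySem.Int.mod_eq_zero_iff_dvd 0 m).mpr (dvd_zero m)

theorem pvmod_dvd (m x : Int) : m ∣ (x - PySem.Int.mod x m) :=
  ⟨PySem.Int.floordiv x m, by linarith [PySem.Int.floordiv_mul_add_mod x m]⟩

theorem pvmod_congr {m x y : Int} (hm : m ≠ 0) (h : m ∣ (x - y)) :
    PySem.Int.mod x m = PySem.Int.mod y m := by
  have hd : m ∣ (PySem.Int.mod x m - PySem.Int.mod y m) := by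
    have e : PySem.Int.mod x m - PySem.Int.mod y m
        = (x - y) - (x - PySem.Int.mod x m) + (y - PySem.Int.mod y m) := by ring
    rw [e]
    exact dvd_add (dvd_sub h (pvmod_dvd m x)) (pvmod_dvd m y)
  rcases lt_or_gt_of_ne hm with hneg | hpos
  · have bx := PySem.Int.mod_neg_bounds (a := x) hneg
    have by_ := PySem.Int.mod_neg_bounds (a := y) hneg
    have := Int.eq_zero_of_abs_lt_dvd ((Int.neg_dvd).mpr hd)
      (by rw [abs_lt]; constructor <;> omega)
    omega
  · have bx1 := PySem.Int.mod_nonneg (a := x) hpos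
    have bx2 := PySem.Int.mod_lt (a := x) hpos
    have by1 := PySem.Int.mod_nonneg (a := y) hpos
    have by2 := PySem.Int.mod_lt (a := y) hpos
    have := Int.eq_zero_of_abs_lt_dvd hd (by rw [abs_lt]; omega)
    omega

theorem pvmod_idem {m : Int} (hm : m ≠ 0) (x : Int) :
    PySem.Int.mod (PySem.Int.mod x m) m = PySem.Int.mod x m :=
  pvmod_congr hm (by simpa [neg_sub] using (pvmod_dvd m x).neg_right)

theorem pvE_MM {m : Int} (P : List (List Int)) (i j : Nat) :
    pvE (pvMM m P) i j = PySem.Int.mod (pvE P i j) m := by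
  simp only [pvMM, pvE, List.getD, List.getElem?_map]
  cases hP : P[i]? with
  | none => simp [pvmod_zero]
  | some r =>
    simp only [Option.map_some, Option.getD_some, List.getElem?_map]
    cases hr : r[j]? with
    | none => simp [pvmod_zero]
    | some a => simp

theorem pvE_PM (n : Nat) (P Q : List (List Int)) {i j : Nat} (hi : i < n) (hj : j < n) :
    pvE (pvPM n P Q) i j = ((List.range n).map (fun k => pvE P i k * pvE Q k j)).sum := by
  unfold pvE pvPM
  rw [PySem.List.getD_map_range _ _ _ _ hi, PySem.List.getD_map_range _ _ _ _ hj]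
  rfl

theorem pvShape_PM (n : Nat) (P Q : List (List Int)) : pvShape n (pvPM n P Q) := by
  constructor <;> simp [pvPM]
theorem pvShape_MM {n : Nat} (m : Int) {P : List (List Int)} (h : pvShape n P) :
    pvShape n (pvMM m P) := by
  obtain ⟨h1, h2⟩ := h
  refine ⟨by simp [pvMM, h1], ?_⟩
  intro r hr
  simp only [pvMM, List.mem_map] at hr
  obtain ⟨r0, hr0, rfl⟩ := hr
  simp [h2 r0 hr0]
theorem pvShape_I (n : Nat) : pvShape n (pvI n) := by
  constructor <;> simp [pvI]
theorem pvShape_Tri (A B C : Int) (n : Nat) : pvShape n (pvTri A B C n) := by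
  constructor <;> simp [pvTri]
theorem pvShape_RawPow (n : Nat) (X : List (List Int)) (k : Nat) :
    pvShape n (pvRawPow n X k) := by
  cases k with
  | zero => exact pvShape_I n
  | succ k => exact pvShape_PM n _ _

theorem pvE_apply {Q : List (List Int)} {i j : Nat} (hi : i < Q.length)
    (hj : j < (Q[i]).length) : pvE Q i j = Q[i][j] := by
  unfold pvE
  rw [List.getD_eq_getElem _ _ hi, List.getD_eq_getElem _ _ hj]

-- a matrix of shape n×n is determined by its entries
theorem pv_eta {n : Nat} {Q : List (List Int)} (h : pvShape n Q) :
    (List.range n).map (fun i => (List.range n).map (fun j => pvE Q i j)) = Q := by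
  obtain ⟨h1, h2⟩ := h
  apply List.ext_getElem (by simpa using h1.symm)
  intro i hi hi'
  have hQi : (Q[i]).length = n := h2 _ (List.getElem_mem hi')
  simp only [List.getElem_map, List.getElem_range]
  apply List.ext_getElem (by simpa using hQi.symm)
  intro j hj hj'
  simp only [List.getElem_map, List.getElem_range]
  exact pvE_apply hi' hj'

theorem pv_mm_canon {n : Nat} {m : Int} {P : List (List Int)} (h : pvShape n P) :
    pvMM m P = (List.range n).map (fun i => (List.range n).map (fun j =>
      PySem.Int.mod (pvE P i j) m)) := by
  conv_lhs => rw [← pv_eta (pvShape_MM m h)]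
  simp only [pvE_MM]

theorem pv_mm_ext {n : Nat} {m : Int} {P Q : List (List Int)}
    (hP : pvShape n P) (hQ : pvShape n Q)
    (h : ∀ i j, i < n → j < n → PySem.Int.mod (pvE P i j) m = PySem.Int.mod (pvE Q i j) m) :
    pvMM m P = pvMM m Q := by
  rw [pv_mm_canon hP, pv_mm_canon hQ]
  apply List.map_congr_left
  intro i hi
  apply List.map_congr_left
  intro j hj
  rw [List.mem_range] at hi hj
  exact h i j hi hj

theorem pv_dvd_sum_range {m : Int} (n : Nat) (f g : Nat → Int)
    (h : ∀ k, k < n → m ∣ (f k - g k)) :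
    m ∣ (((List.range n).map f).sum - ((List.range n).map g).sum) := by
  rw [← pv_sum_range, ← pv_sum_range, ← Finset.sum_sub_distrib]
  exact Finset.dvd_sum (fun k hk => h k (Finset.mem_range.mp hk))

theorem pv_pm_mm_left {n : Nat} {m : Int} (hm : m ≠ 0) (P Q : List (List Int)) :
    pvMM m (pvPM n (pvMM m P) Q) = pvMM m (pvPM n P Q) := by
  apply pv_mm_ext (pvShape_PM n _ _) (pvShape_PM n _ _)
  intro i j hi hj
  rw [pvE_PM n _ _ hi hj, pvE_PM n _ _ hi hj]
  apply pvmod_congr hm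
  apply pv_dvd_sum_range
  intro k _
  rw [pvE_MM]
  have : PySem.Int.mod (pvE P i k) m * pvE Q k j - pvE P i k * pvE Q k j
      = -((pvE P i k - PySem.Int.mod (pvE P i k) m) * pvE Q k j) := by ring
  rw [this]
  exact (dvd_mul_of_dvd_left (pvmod_dvd m _) _).neg_right

theorem pv_pm_mm_right {n : Nat} {m : Int} (hm : m ≠ 0) (P Q : List (List Int)) :
    pvMM m (pvPM n P (pvMM m Q)) = pvMM m (pvPM n P Q) := by
  apply pv_mm_ext (pvShape_PM n _ _) (pvShape_PM n _ _)
  intro i j hi hj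
  rw [pvE_PM n _ _ hi hj, pvE_PM n _ _ hi hj]
  apply pvmod_congr hm
  apply pv_dvd_sum_range
  intro k _
  rw [pvE_MM]
  have : pvE P i k * PySem.Int.mod (pvE Q k j) m - pvE P i k * pvE Q k j
      = -(pvE P i k * (pvE Q k j - PySem.Int.mod (pvE Q k j) m)) := by ring
  rw [this]
  exact (dvd_mul_of_dvd_right (pvmod_dvd m _) _).neg_right

theorem pv_mm_mm {m : Int} (hm : m ≠ 0) (P : List (List Int)) :
    pvMM m (pvMM m P) = pvMM m P := by
  unfold pvMM
  rw [List.map_map]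
  apply List.map_congr_left
  intro r _
  simp only [Function.comp]
  rw [List.map_map]
  apply List.map_congr_left
  intro x _
  exact pvmod_idem hm x

theorem pv_mm_congr {n : Nat} {m : Int} (hm : m ≠ 0) {P P' Q Q' : List (List Int)}
    (h1 : pvMM m P = pvMM m P') (h2 : pvMM m Q = pvMM m Q') :
    pvMM m (pvPM n P Q) = pvMM m (pvPM n P' Q') := by
  rw [← pv_pm_mm_left hm P Q, ← pv_pm_mm_right hm (pvMM m P) Q, h1, h2,
    pv_pm_mm_right hm, pv_pm_mm_left hm]

theorem pv_pm_assoc (n : Nat) (P Q R : List (List Int)) :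
    pvPM n (pvPM n P Q) R = pvPM n P (pvPM n Q R) := by
  unfold pvPM
  apply List.map_congr_left
  intro i hi
  apply List.map_congr_left
  intro j hj
  rw [List.mem_range] at hi hj
  have el : ∀ k, k ∈ List.range n →
      pvE ((List.range n).map (fun i => (List.range n).map (fun j =>
        ((List.range n).map (fun k => pvE P i k * pvE Q k j)).sum))) i k * pvE R k j
      = ((List.range n).map (fun l => pvE P i l * pvE Q l k)).sum * pvE R k j := by
    intro k hk
    rw [List.mem_range] at hk
    congr 1
    exact pvE_PM n P Q hi hk
  have er : ∀ l, l ∈ List.range n →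
      pvE P i l * pvE ((List.range n).map (fun i => (List.range n).map (fun j =>
        ((List.range n).map (fun k => pvE Q i k * pvE R k j)).sum))) l j
      = pvE P i l * ((List.range n).map (fun k => pvE Q l k * pvE R k j)).sum := by
    intro l hl
    rw [List.mem_range] at hl
    congr 1
    exact pvE_PM n Q R hl hj
  rw [List.map_congr_left el, List.map_congr_left er]
  rw [← pv_sum_range, ← pv_sum_range]
  have : ∀ k, ((List.range n).map (fun l => pvE P i l * pvE Q l k)).sum
      = ∑ l ∈ Finset.range n, pvE P i l * pvE Q l k := fun k => (pv_sum_range n _).symm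
  simp only [this]
  have : ∀ l, ((List.range n).map (fun k => pvE Q l k * pvE R k j)).sum
      = ∑ k ∈ Finset.range n, pvE Q l k * pvE R k j := fun l => (pv_sum_range n _).symm
  simp only [this]
  simp only [Finset.sum_mul, Finset.mul_sum, mul_assoc]
  exact Finset.sum_comm

theorem pv_pm_I_left {n : Nat} {Q : List (List Int)} (h : pvShape n Q) :
    pvPM n (pvI n) Q = Q := by
  conv_rhs => rw [← pv_eta h]
  unfold pvPM
  apply List.map_congr_left
  intro i hi
  apply List.map_congr_left
  intro j hj
  rw [List.mem_range] at hi hj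
  have el : ∀ k, k ∈ List.range n → pvE (pvI n) i k * pvE Q k j
      = (if i = k then 1 else 0) * pvE Q k j := by
    intro k hk
    rw [List.mem_range] at hk
    unfold pvE pvI
    rw [PySem.List.getD_map_range _ _ _ _ hi, PySem.List.getD_map_range _ _ _ _ hk]
  rw [List.map_congr_left el, ← pv_sum_range]
  rw [Finset.sum_eq_single i (by intro b _ hb; simp [Ne.symm hb]) (by intro h'; exact absurd (Finset.mem_range.mpr hi) h')]
  simp

theorem pv_pm_I_right {n : Nat} {P : List (List Int)} (h : pvShape n P) :
    pvPM n P (pvI n) = P := by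
  conv_rhs => rw [← pv_eta h]
  unfold pvPM
  apply List.map_congr_left
  intro i hi
  apply List.map_congr_left
  intro j hj
  rw [List.mem_range] at hi hj
  have el : ∀ k, k ∈ List.range n → pvE P i k * pvE (pvI n) k j
      = pvE P i k * (if k = j then 1 else 0) := by
    intro k hk
    rw [List.mem_range] at hk
    unfold pvE pvI
    rw [PySem.List.getD_map_range _ _ _ _ hk, PySem.List.getD_map_range _ _ _ _ hj]
  rw [List.map_congr_left el, ← pv_sum_range]
  rw [Finset.sum_eq_single j (by intro b _ hb; simp [hb]) (by intro h'; exact absurd (Finset.mem_range.mpr hj) h')]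
  simp

theorem pvRawPow_add {n : Nat} {X : List (List Int)} (hX : pvShape n X) (a b : Nat) :
    pvRawPow n X (a + b) = pvPM n (pvRawPow n X a) (pvRawPow n X b) := by
  induction b with
  | zero => simp [pvRawPow, pv_pm_I_right (pvShape_RawPow n X a)]
  | succ b ih =>
    show pvPM n (pvRawPow n X (a + b)) X = _
    rw [ih, pv_pm_assoc]
    rfl

theorem pvRawPow_one {n : Nat} {X : List (List Int)} (hX : pvShape n X) :
    pvRawPow n X 1 = X := by
  show pvPM n (pvI n) X = X
  exact pv_pm_I_left hX

-- ZipStar of a square matrix is the list of its n columns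
theorem pvZipStar_sq {n : Nat} {Q : List (List Int)} (h : pvShape n Q) :
    pvZipStar Q = (List.range n).map (fun j => Q.map (fun row => row.getD j 0)) := by
  obtain ⟨h1, h2⟩ := h
  cases Q with
  | nil => simp at h1; subst h1; rfl
  | cons r rs =>
    have hmin : ∀ (l : List (List Int)) (w : Nat), (∀ row ∈ l, row.length = n) → w = n →
        l.foldl (fun w row => min w row.length) w = n := by
      intro l
      induction l with
      | nil => intro w _ hw; exact hw
      | cons a t ih =>
        intro w hrow hw
        simp only [List.foldl_cons]
        exact ih _ (fun row hr => hrow row (List.mem_cons_of_mem a hr))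
          (by rw [hw, hrow a List.mem_cons_self]; simp)
    have e : pvZipStar (r :: rs)
        = (List.range (rs.foldl (fun w row => min w row.length) r.length)).map
          (fun j => (r :: rs).map (fun row => row.getD j 0)) := rfl
    rw [e, hmin rs r.length (fun row hr => h2 row (List.mem_cons_of_mem r hr))
      (h2 r List.mem_cons_self)]

theorem pv_map_eq_range {n : Nat} {P : List (List Int)} (h : P.length = n)
    (f : List Int → List Int) :
    P.map f = (List.range n).map (fun i => f (P.getD i [])) := by
  apply List.ext_getElem (by simp [h])
  intro i hi hi'
  simp only [List.getElem_map, List.getElem_range]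
  congr 1
  rw [List.getD_eq_getElem _ _ (by simp at hi; omega)]

theorem pv_zipWith_mul_eq {n : Nat} {a b : List Int} (ha : a.length = n) (hb : b.length = n) :
    List.zipWith (· * ·) a b = (List.range n).map (fun k => a.getD k 0 * b.getD k 0) := by
  apply List.ext_getElem (by simp [ha, hb])
  intro k hk hk'
  simp only [List.length_zipWith, List.length_map, List.length_range] at hk hk'
  simp only [List.getElem_zipWith, List.getElem_map, List.getElem_range]
  rw [List.getD_eq_getElem _ _ (by omega), List.getD_eq_getElem _ _ (by omega)]

-- A's mat_mul is the modded abstract product on square matrices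
theorem pvMatMulA_eq {n : Nat} {m : Int} {P Q : List (List Int)}
    (hP : pvShape n P) (hQ : pvShape n Q) :
    pvMatMulA P Q m = pvMM m (pvPM n P Q) := by
  obtain ⟨hP1, hP2⟩ := hP
  obtain ⟨hQ1, hQ2⟩ := hQ
  unfold pvMatMulA pvMM pvPM
  simp only [List.map_map]
  rw [pv_map_eq_range hP1]
  apply List.map_congr_left
  intro i hi
  rw [List.mem_range] at hi
  rw [pvZipStar_sq ⟨hQ1, hQ2⟩]
  simp only [List.map_map, Function.comp]
  apply List.map_congr_left
  intro j hj
  rw [List.mem_range] at hj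
  simp only [Function.comp]
  have hrow : (P.getD i []).length = n := by
    rw [List.getD_eq_getElem _ _ (by omega)]
    exact hP2 _ (List.getElem_mem (by omega))
  have hcol : (Q.map (fun row => row.getD j 0)).length = n := by simp [hQ1]
  have hdot : pvDot (P.getD i []) (Q.map (fun row => row.getD j 0))
      = ((List.range n).map (fun k => pvE P i k * pvE Q k j)).sum := by
    unfold pvDot
    rw [pv_zipWith_mul_eq hrow hcol]
    apply congrArg
    apply List.map_congr_left
    intro k hk
    rw [List.mem_range] at hk
    unfold pvE
    have h1 : Q.getD k [] = Q[k]'(by omega) := List.getD_eq_getElem _ _ (by omega)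
    have : (Q.map (fun row => row.getD j 0)).getD k 0 = (Q.getD k []).getD j 0 := by
      rw [List.getD_eq_getElem _ _ (by simp [hQ1]; omega), List.getElem_map, h1]
    rw [this]
  rw [hdot]

-- B's mat_mul is the modded abstract product, definitionally
theorem pvMatMulB_eq (n : Nat) (m : Int) (P Q : List (List Int)) :
    pvMatMulB n m P Q = pvMM m (pvPM n P Q) := by
  simp [pvMatMulB, pvMM, pvPM, List.map_map, pvE]


theorem pv_foldl_set_len (l : List Nat) (L : List (List Int)) (sig : Nat → Nat)
    (g : List (List Int) → Nat → List Int) :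
    (l.foldl (fun X k => X.set (sig k) (g X k)) L).length = L.length := by
  induction l generalizing L with
  | nil => rfl
  | cons a t ih => rw [List.foldl_cons, ih, List.length_set]

theorem pvIdLoop_getD (s : Nat) (L : List (List Int)) (j : Nat) :
    ((List.range s).foldl (fun Acc i => Acc.set i ((Acc.getD i []).set i 1)) L).getD j []
      = if j < s ∧ j < L.length then (L.getD j []).set j 1 else L.getD j [] := by
  induction s generalizing j with
  | zero => simp
  | succ s ih =>
    rw [List.range_succ, List.foldl_append, List.foldl_cons, List.foldl_nil, pv_getD_set',
      pv_foldl_set_len (sig := fun i => i) (g := fun Acc i => (Acc.getD i []).set i 1),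
      ih s, ih j]
    by_cases hc : j = s
    · subst hc
      by_cases h2 : j < L.length
      · simp [h2]
      · simp [h2]
    · by_cases h3 : j < s ∧ j < L.length
      · rw [if_neg (by tauto : ¬(j = s ∧ s < L.length)), if_pos h3,
          if_pos (⟨by omega, h3.2⟩ : j < s + 1 ∧ j < L.length)]
      · rw [if_neg (by tauto : ¬(j = s ∧ s < L.length)), if_neg h3,
          if_neg (by omega : ¬(j < s + 1 ∧ j < L.length))]

theorem pvIdentA_eq (n : Nat) : pvIdentA n = pvI n := by
  have hlen : (pvIdentA n).length = n := by
    unfold pvIdentA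
    rw [pv_foldl_set_len (sig := fun i => i) (g := fun Acc i => (Acc.getD i []).set i 1),
      List.length_replicate]
  apply List.ext_getElem (by rw [hlen]; simp [pvI])
  intro i hi hi'
  rw [hlen] at hi
  rw [← List.getD_eq_getElem _ [] (by rw [hlen]; exact hi)]
  unfold pvIdentA
  rw [pvIdLoop_getD,
    if_pos (⟨hi, by simpa using hi⟩ : i < n ∧ i < (List.replicate n (List.replicate n (0:Int))).length),
    List.getD_eq_getElem _ _ (by simpa using hi), List.getElem_replicate]
  simp only [pvI, List.getElem_map, List.getElem_range]
  apply List.ext_getElem (by simp)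
  intro k hk hk'
  simp only [List.length_set, List.length_replicate] at hk
  simp only [List.getElem_set, List.getElem_replicate, List.getElem_map, List.getElem_range]

theorem pvXLoop_getD (A B C : Int) (s : Nat) (L : List (List Int)) (j : Nat) :
    ((List.range s).foldl
        (fun X k => X.set (k + 1) ((((X.getD (k + 1) []).set k C).set (k + 1) B).set (k + 2) A))
        L).getD j []
      = if 1 ≤ j ∧ j ≤ s ∧ j < L.length
          then (((L.getD j []).set (j - 1) C).set j B).set (j + 1) A
          else L.getD j [] := by
  induction s generalizing j with
  | zero => rw [List.range_zero, List.foldl_nil, if_neg (by omega)]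
  | succ s ih =>
    rw [List.range_succ, List.foldl_append, List.foldl_cons, List.foldl_nil, pv_getD_set',
      pv_foldl_set_len (sig := fun k => k + 1)
        (g := fun X k => (((X.getD (k + 1) []).set k C).set (k + 1) B).set (k + 2) A),
      ih (s + 1), ih j]
    rw [if_neg (by omega : ¬(1 ≤ s + 1 ∧ s + 1 ≤ s ∧ s + 1 < L.length))]
    by_cases hc : j = s + 1
    · subst hc
      by_cases h2 : s + 1 < L.length
      · rw [if_pos ⟨rfl, h2⟩,
          if_pos (by omega : 1 ≤ s + 1 ∧ s + 1 ≤ s + 1 ∧ s + 1 < L.length)]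
        simp
      · rw [if_neg (by tauto : ¬(s + 1 = s + 1 ∧ s + 1 < L.length)),
          if_neg (by omega : ¬(1 ≤ s + 1 ∧ s + 1 ≤ s ∧ s + 1 < L.length)),
          if_neg (by omega : ¬(1 ≤ s + 1 ∧ s + 1 ≤ s + 1 ∧ s + 1 < L.length))]
    · by_cases h3 : 1 ≤ j ∧ j ≤ s ∧ j < L.length
      · rw [if_neg (by tauto : ¬(j = s + 1 ∧ s + 1 < L.length)), if_pos h3,
          if_pos (by omega : 1 ≤ j ∧ j ≤ s + 1 ∧ j < L.length)]
      · rw [if_neg (by tauto : ¬(j = s + 1 ∧ s + 1 < L.length)), if_neg h3,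
          if_neg (by omega : ¬(1 ≤ j ∧ j ≤ s + 1 ∧ j < L.length))]

theorem pvRow0_eq (A B C : Int) {n : Nat} (hn : 2 ≤ n) :
    ((List.replicate n (0 : Int)).set 0 B).set 1 A
      = (List.range n).map (fun j =>
          if j = 0 then B else if j = 0 + 1 then A else if j = 0 - 1 then C else (0 : Int)) := by
  apply List.ext_getElem (by simp)
  intro k hk hk'
  simp only [List.length_set, List.length_replicate] at hk
  simp only [List.getElem_set, List.getElem_replicate, List.getElem_map, List.getElem_range]
  split_ifs <;> first | rfl | omega

theorem pvRowMid_eq (A B C : Int) {n : Nat} {i : Nat} (h1 : 1 ≤ i) (h2 : i + 1 < n) :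
    (((List.replicate n (0 : Int)).set (i - 1) C).set i B).set (i + 1) A
      = (List.range n).map (fun j =>
          if j = i then B else if j = i + 1 then A else if j = i - 1 then C else (0 : Int)) := by
  apply List.ext_getElem (by simp)
  intro k hk hk'
  simp only [List.length_set, List.length_replicate] at hk
  simp only [List.getElem_set, List.getElem_replicate, List.getElem_map, List.getElem_range]
  split_ifs <;> first | rfl | omega

theorem pvRowLast_eq (A B C : Int) {n : Nat} (hn : 2 ≤ n) :
    ((List.replicate n (0 : Int)).set (n - 2) C).set (n - 1) B
      = (List.range n).map (fun j =>
          if j = n - 1 then B else if j = n - 1 + 1 then A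
          else if j = n - 1 - 1 then C else (0 : Int)) := by
  apply List.ext_getElem (by simp)
  intro k hk hk'
  simp only [List.length_set, List.length_replicate] at hk
  simp only [List.getElem_set, List.getElem_replicate, List.getElem_map, List.getElem_range]
  split_ifs <;> first | rfl | omega

theorem pvXA_eq (A B C : Int) {n : Nat} (hn : 2 ≤ n) :
    (((List.range (n - 2)).foldl
      (fun X k => X.set (k + 1) ((((X.getD (k + 1) []).set k C).set (k + 1) B).set (k + 2) A))
      ((List.replicate n (List.replicate n (0 : Int))).set 0
        ((((List.replicate n (List.replicate n (0 : Int))).getD 0 []).set 0 B).set 1 A))).set (n - 1)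
      (((((List.range (n - 2)).foldl
      (fun X k => X.set (k + 1) ((((X.getD (k + 1) []).set k C).set (k + 1) B).set (k + 2) A))
      ((List.replicate n (List.replicate n (0 : Int))).set 0
        ((((List.replicate n (List.replicate n (0 : Int))).getD 0 []).set 0 B).set 1 A))).getD (n - 1) []).set (n - 2) C).set (n - 1) B)) = pvTri A B C n := by
  have hX1len : ((List.replicate n (List.replicate n (0 : Int))).set 0
      ((((List.replicate n (List.replicate n (0 : Int))).getD 0 []).set 0 B).set 1 A)).length
      = n := by simp
  have hX2len : ((List.range (n - 2)).foldl
      (fun X k => X.set (k + 1) ((((X.getD (k + 1) []).set k C).set (k + 1) B).set (k + 2) A))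
      ((List.replicate n (List.replicate n (0 : Int))).set 0
        ((((List.replicate n (List.replicate n (0 : Int))).getD 0 []).set 0 B).set 1 A))).length = n := by
    rw [pv_foldl_set_len (sig := fun k => k + 1)
      (g := fun X k => (((X.getD (k + 1) []).set k C).set (k + 1) B).set (k + 2) A), hX1len]
  have hRget : ∀ j, j < n →
      (List.replicate n (List.replicate n (0 : Int))).getD j [] = List.replicate n (0 : Int) := by
    intro j hj
    rw [List.getD_eq_getElem _ _ (by simpa using hj), List.getElem_replicate]
  have hX1get : ∀ j, j < n →
      ((List.replicate n (List.replicate n (0 : Int))).set 0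
        ((((List.replicate n (List.replicate n (0 : Int))).getD 0 []).set 0 B).set 1 A)).getD j []
      = if j = 0 then ((List.replicate n (0 : Int)).set 0 B).set 1 A
        else List.replicate n (0 : Int) := by
    intro j hj
    rw [pv_getD_set', hRget 0 (by omega)]
    by_cases h : j = 0
    · rw [if_pos ⟨h, by simp; omega⟩, if_pos h]
    · rw [if_neg (by tauto), if_neg h, hRget j hj]
  have hX2get : ∀ j, j < n →
      ((List.range (n - 2)).foldl
      (fun X k => X.set (k + 1) ((((X.getD (k + 1) []).set k C).set (k + 1) B).set (k + 2) A))
      ((List.replicate n (List.replicate n (0 : Int))).set 0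
        ((((List.replicate n (List.replicate n (0 : Int))).getD 0 []).set 0 B).set 1 A))).getD j []
      = if j = 0 then ((List.replicate n (0 : Int)).set 0 B).set 1 A
        else if 1 ≤ j ∧ j ≤ n - 2
          then (((List.replicate n (0 : Int)).set (j - 1) C).set j B).set (j + 1) A
        else List.replicate n (0 : Int) := by
    intro j hj
    rw [pvXLoop_getD, hX1len]
    by_cases h0 : j = 0
    · rw [if_neg (by omega), if_pos h0, hX1get j hj, if_pos h0]
    · by_cases h1 : 1 ≤ j ∧ j ≤ n - 2
      · rw [if_pos ⟨h1.1, h1.2, by omega⟩, hX1get j hj, if_neg h0, if_neg h0, if_pos h1]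
      · rw [if_neg (by omega), hX1get j hj, if_neg h0, if_neg h0, if_neg h1]
  apply List.ext_getElem (by rw [List.length_set, hX2len]; simp [pvTri])
  intro i hi hi'
  have hin : i < n := by rw [List.length_set, hX2len] at hi; omega
  rw [← List.getD_eq_getElem _ [] hi, pv_getD_set', hX2len]
  have htri : (pvTri A B C n)[i] = (List.range n).map (fun j =>
      if j = i then B else if j = i + 1 then A else if j = i - 1 then C else (0 : Int)) := by
    simp only [pvTri, List.getElem_map, List.getElem_range]
  rw [htri]
  by_cases hlast : i = n - 1
  · rw [if_pos ⟨hlast, by omega⟩, hX2get (n - 1) (by omega),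
      if_neg (by omega), if_neg (by omega)]
    subst hlast
    exact pvRowLast_eq A B C hn
  · rw [if_neg (by tauto), hX2get i hin]
    by_cases h0 : i = 0
    · rw [if_pos h0]
      subst h0
      exact pvRow0_eq A B C hn
    · rw [if_neg h0, if_pos (by omega : 1 ≤ i ∧ i ≤ n - 2)]
      exact pvRowMid_eq A B C (by omega) (by omega)

-- vectors of length n are determined by their entries
theorem pv_vec_eta {n : Nat} {acc : List Int} (h : acc.length = n) :
    (List.range n).map (fun j => acc.getD j 0) = acc := by
  apply List.ext_getElem (by simp [h])
  intro k hk hk'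
  simp only [List.getElem_map, List.getElem_range]
  rw [List.getD_eq_getElem _ _ (by omega)]

theorem pv_zipWith_eq_map_zip (f : Int → List Int → Int) (l : List Int) (P : List (List Int)) :
    List.zipWith f l P = (List.zip l P).map (fun p => f p.1 p.2) := by
  induction l generalizing P with
  | nil => simp
  | cons a t ih => cases P <;> simp [ih]

theorem pv_vecstep_eq {n : Nat} (acc r : List Int) (x : Int)
    (hacc : acc.length = n) (hr : r.length = n) :
    List.zipWith (fun o p => o + x * p) acc r
      = (List.range n).map (fun j => acc.getD j 0 + x * r.getD j 0) := by
  apply List.ext_getElem (by simp [hacc, hr])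
  intro k hk hk'
  simp only [List.length_zipWith] at hk
  simp only [List.getElem_zipWith, List.getElem_map, List.getElem_range]
  rw [List.getD_eq_getElem _ _ (by omega), List.getD_eq_getElem _ _ (by omega)]

theorem pv_foldl_vec {n : Nat} :
    ∀ (L : List (Int × List Int)) (acc : List Int), acc.length = n →
      (∀ p ∈ L, (p.2).length = n) →
      L.foldl (fun out xr => List.zipWith (fun o r => o + xr.1 * r) out xr.2) acc
        = (List.range n).map
            (fun j => acc.getD j 0 + (L.map (fun xr => xr.1 * (xr.2.getD j 0))).sum) := by
  intro L
  induction L with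
  | nil =>
    intro acc hacc _
    simp only [List.foldl_nil, List.map_nil, List.sum_nil, add_zero]
    exact (pv_vec_eta hacc).symm
  | cons p t ih =>
    intro acc hacc hrows
    rw [List.foldl_cons, pv_vecstep_eq acc p.2 p.1 hacc (hrows p List.mem_cons_self),
      ih _ (by simp) (fun q hq => hrows q (List.mem_cons_of_mem _ hq))]
    apply List.map_congr_left
    intro j hj
    rw [List.mem_range] at hj
    rw [PySem.List.getD_map_range _ _ _ _ hj]
    simp only [List.map_cons, List.sum_cons]
    ring

-- the final vector step: A's single-row mat_mul equals B's row-streamed fold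
theorem pvFinal_eq {n : Nat} {m : Int} {P : List (List Int)} (hP : pvShape n P) (v : List Int) :
    (pvMatMulA [v] P m).headI =
      ((List.zip v P).foldl
        (fun out xr => List.zipWith (fun o r => o + xr.1 * r) out xr.2)
        (List.replicate n (0 : Int))).map (fun o => PySem.Int.mod o m) := by
  have hA : (pvMatMulA [v] P m).headI
      = (pvZipStar P).map (fun Bj => PySem.Int.mod (pvDot v Bj) m) := rfl
  rw [hA, pvZipStar_sq hP, List.map_map,
    pv_foldl_vec (List.zip v P) _ (by simp) (fun p hp => hP.2 _ (List.of_mem_zip hp).2),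
    List.map_map]
  apply List.map_congr_left
  intro j hj
  rw [List.mem_range] at hj
  simp only [Function.comp]
  have hrep : (List.replicate n (0 : Int)).getD j 0 = 0 := by
    rw [List.getD_eq_getElem _ _ (by simpa using hj), List.getElem_replicate]
  rw [hrep, zero_add]
  congr 1
  unfold pvDot
  rw [List.zipWith_map_right, pv_zipWith_eq_map_zip]

theorem pvMatPowLoop_nonpos (fuel : Nat) (Acc X : List (List Int)) {t m : Int}
    (ht : ¬ 0 < t) : pvMatPowLoop fuel Acc X t m = Acc := by
  cases fuel <;> simp [pvMatPowLoop, ht]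

theorem pvPowB_nonpos (n : Nat) (m : Int) (P : List (List Int)) (fuel : Nat) {t : Int}
    (ht : t ≤ 0) : pvPowB n m P fuel t = pvI n := by
  cases fuel <;> simp [pvPowB, pvI, ht]

theorem pvRawPow_sq {n : Nat} {m : Int} (hm : m ≠ 0) {X : List (List Int)} (hX : pvShape n X)
    (q : Nat) :
    pvMM m (pvRawPow n (pvMM m (pvPM n X X)) q) = pvMM m (pvRawPow n X (2 * q)) := by
  induction q with
  | zero => rfl
  | succ q ih =>
    have h2 : pvMM m (pvMM m (pvPM n X X)) = pvMM m (pvRawPow n X 2) := by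
      rw [pv_mm_mm hm, show pvRawPow n X 2 = pvPM n (pvRawPow n X 1) X from rfl,
        pvRawPow_one hX]
    show pvMM m (pvPM n (pvRawPow n (pvMM m (pvPM n X X)) q) (pvMM m (pvPM n X X))) = _
    rw [pv_mm_congr hm ih h2, ← pvRawPow_add hX,
      show 2 * q + 2 = 2 * (q + 1) by ring]

-- B's power equals the reduced abstract power, for t > 0
theorem pvPowB_eq {n : Nat} {m : Int} (hm : m ≠ 0) {X : List (List Int)} (hX : pvShape n X) :
    ∀ (fuel : Nat) (t : Int), 0 < t → t.toNat ≤ fuel →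
      pvPowB n m X fuel t = pvMM m (pvRawPow n X t.toNat) := by
  intro fuel
  induction fuel with
  | zero => intro t ht hle; omega
  | succ fuel ih =>
    intro t ht hle
    have hq : PySem.Int.floordiv t 2 = t / 2 := PySem.Int.floordiv_eq_ediv_of_pos (by omega)
    have hm2 : PySem.Int.mod t 2 = t % 2 := PySem.Int.mod_eq_emod_of_pos (by omega)
    rw [pvPowB, if_neg (by omega : ¬ t ≤ 0)]
    simp only [hq, hm2]
    by_cases h1 : t < 2
    · have ht1 : t = 1 := by omega
      subst ht1
      rw [show (1 : Int) / 2 = 0 by decide, pvPowB_nonpos n m X fuel le_rfl,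
        if_pos (by decide : (1 : Int) % 2 ≠ 0),
        pvMatMulB_eq n m (pvI n) (pvI n), pv_pm_I_left (pvShape_I n),
        pvMatMulB_eq, pv_pm_mm_left hm, pv_pm_I_left hX,
        show ((1 : Int)).toNat = 1 from rfl, pvRawPow_one hX]
    · have hq1 : (0 : Int) < t / 2 := by omega
      have hle2 : (t / 2).toNat ≤ fuel := by omega
      rw [ih (t / 2) hq1 hle2]
      have hHH : pvMM m (pvMM m (pvRawPow n X (t / 2).toNat))
          = pvMM m (pvRawPow n X (t / 2).toNat) := pv_mm_mm hm _
      have hH2 : pvMM m (pvMatMulB n m (pvMM m (pvRawPow n X (t / 2).toNat))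
            (pvMM m (pvRawPow n X (t / 2).toNat)))
          = pvMM m (pvRawPow n X ((t / 2).toNat + (t / 2).toNat)) := by
        rw [pvMatMulB_eq, pv_mm_mm hm, pv_mm_congr hm hHH hHH, ← pvRawPow_add hX]
      by_cases hodd : t % 2 ≠ 0
      · rw [if_pos hodd,
          pvMatMulB_eq n m (pvMatMulB n m (pvMM m (pvRawPow n X (t / 2).toNat))
            (pvMM m (pvRawPow n X (t / 2).toNat))) X]
        have hXe : pvMM m X = pvMM m (pvRawPow n X 1) := by rw [pvRawPow_one hX]
        rw [pv_mm_congr hm hH2 hXe, ← pvRawPow_add hX,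
          show (t / 2).toNat + (t / 2).toNat + 1 = t.toNat by omega]
      · rw [if_neg hodd, pvMatMulB_eq, pv_mm_congr hm hHH hHH, ← pvRawPow_add hX,
          show (t / 2).toNat + (t / 2).toNat = t.toNat by omega]

-- A's power loop equals the reduced abstract power, for t > 0
theorem pvMatPowLoop_eq {n : Nat} {m : Int} (hm : m ≠ 0) :
    ∀ (fuel : Nat) (t : Int), 0 < t → t.toNat ≤ fuel → ∀ (Acc X : List (List Int)),
      pvShape n Acc → pvShape n X →
      pvMatPowLoop fuel Acc X t m = pvMM m (pvPM n Acc (pvRawPow n X t.toNat)) := by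
  intro fuel
  induction fuel with
  | zero => intro t ht hle; omega
  | succ fuel ih =>
    intro t ht hle Acc X hAcc hX
    have hq : PySem.Int.floordiv t 2 = t / 2 := PySem.Int.floordiv_eq_ediv_of_pos (by omega)
    have hm2 : PySem.Int.band t 1 = t % 2 := by
      rw [PySem.Int.band_one t, PySem.Int.mod_eq_emod_of_pos (by omega)]
    rw [pvMatPowLoop, if_pos ht]
    simp only [hq, hm2]
    by_cases h1 : t < 2
    · have ht1 : t = 1 := by omega
      subst ht1
      rw [show (1 : Int) / 2 = 0 by decide,
        pvMatPowLoop_nonpos fuel _ _ (by omega : ¬ (0 : Int) < 0),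
        if_pos (by decide : (1 : Int) % 2 ≠ 0), pvMatMulA_eq hAcc hX,
        show ((1 : Int)).toNat = 1 from rfl]
      exact (congrArg (fun Z => pvMM m (pvPM n Acc Z)) (pvRawPow_one hX)).symm
    · have hq1 : (0 : Int) < t / 2 := by omega
      have hle2 : (t / 2).toNat ≤ fuel := by omega
      have hAcc' : pvShape n (if t % 2 ≠ 0 then pvMatMulA Acc X m else Acc) := by
        by_cases h : t % 2 ≠ 0
        · rw [if_pos h, pvMatMulA_eq hAcc hX]
          exact pvShape_MM m (pvShape_PM n _ _)
        · rw [if_neg h]; exact hAcc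
      have hX2 : pvShape n (pvMatMulA X X m) := by
        rw [pvMatMulA_eq hX hX]; exact pvShape_MM m (pvShape_PM n _ _)
      rw [ih (t / 2) hq1 hle2 _ _ hAcc' hX2]
      have hpow : pvMM m (pvRawPow n (pvMatMulA X X m) (t / 2).toNat)
          = pvMM m (pvRawPow n X (2 * (t / 2).toNat)) := by
        rw [pvMatMulA_eq hX hX]
        exact pvRawPow_sq hm hX (t / 2).toNat
      rw [pv_mm_congr hm rfl hpow]
      by_cases hodd : t % 2 ≠ 0
      · rw [if_pos hodd, pvMatMulA_eq hAcc hX, pv_pm_mm_left hm, pv_pm_assoc,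
          show pvPM n X (pvRawPow n X (2 * (t / 2).toNat))
              = pvRawPow n X (1 + 2 * (t / 2).toNat) by
            rw [pvRawPow_add hX 1 (2 * (t / 2).toNat), pvRawPow_one hX],
          show 1 + 2 * (t / 2).toNat = t.toNat by omega]
      · rw [if_neg hodd, show 2 * (t / 2).toNat = t.toNat by omega]

-- ===== VERDICT (by name: the statement is the Claim_ definition above) =====
theorem compute_cellular_automaton_states_spec : Claim_equal_compute_cellular_automaton_states := by
  intro N M A B C T v hdom hpre
  obtain ⟨hN, hM⟩ := hpre
  unfold Spec_compute_cellular_automaton_states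
  unfold compute_cellular_automaton_states compute_cellular_automaton_states_alt
  dsimp only
  have hn2 : 2 ≤ N.toNat := by omega
  rw [pvXA_eq A B C hn2]
  unfold pvMatPowA
  rw [pvIdentA_eq]
  have hlen : (pvTri A B C N.toNat).length = N.toNat := by simp [pvTri]
  rw [hlen]
  have hTri := pvShape_Tri A B C N.toNat
  by_cases hT : 0 < T
  · rw [pvMatPowLoop_eq hM T.toNat T hT le_rfl _ _ (pvShape_I N.toNat) hTri,
      pv_pm_I_left (pvShape_RawPow N.toNat _ T.toNat),
      pvPowB_eq hM hTri T.toNat T hT le_rfl]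
    exact pvFinal_eq (pvShape_MM M (pvShape_RawPow N.toNat _ T.toNat)) v
  · rw [pvMatPowLoop_nonpos _ _ _ hT, pvPowB_nonpos N.toNat M _ T.toNat (by omega)]
    exact pvFinal_eq (pvShape_I N.toNat) v

theorem compute_cellular_automaton_states_raises : Claim_raises_compute_cellular_automaton_states := by
  unfold Claim_raises_compute_cellular_automaton_states
  refine ⟨?_, by decide⟩
  intro N M A B C T v _ hr hp
  unfold Raises_compute_cellular_automaton_states at hr
  unfold Pre_compute_cellular_automaton_states at hp
  omega

-- witness self-check: B's port really returns the stated value where A raises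
theorem pvRaiseWitness_ok :
    compute_cellular_automaton_states_alt (pvRaiseWitness_compute_cellular_automaton_states.1)
      (pvRaiseWitness_compute_cellular_automaton_states.2.1)
      (pvRaiseWitness_compute_cellular_automaton_states.2.2.1)
      (pvRaiseWitness_compute_cellular_automaton_states.2.2.2.1)
      (pvRaiseWitness_compute_cellular_automaton_states.2.2.2.2.1)
      (pvRaiseWitness_compute_cellular_automaton_states.2.2.2.2.2.1)
      (pvRaiseWitness_compute_cellular_automaton_states.2.2.2.2.2.2)
      = pvRaiseWitnessOut_compute_cellular_automaton_states :=
  compute_cellular_automaton_states_raises.2.2.2
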